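-- pv_equiv track=rewrite | github.com/jalddak/ps_training | python/programmers/level 2/방금 그 곡.py | code_select
-- ===== SOURCE A (Python) =====
-- def code_select(code):
--     length = len(code)
--     result = []
--     i = 0
--     while i < length:
--         c = code[i]
--         if i < length-1 and code[i+1] == '#':
--             c += '#'
--             i += 1
--         i += 1
--         result.append(c)
--     return result
-- ===== SOURCE B (Python) =====
-- import re
--
-- def code_select(code):
--     return re.findall(r'.#?', code, re.DOTALL)
-- ===== Notes on version B (the rewrite author's own statement) =====
-- stated objective: idiomatic
-- what changed: Replaced the manual index-driven while loop with a single regex findall tokenization (any character followed by an optional sharp sign, with DOTALL so newlines match).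
import Mathlib
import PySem

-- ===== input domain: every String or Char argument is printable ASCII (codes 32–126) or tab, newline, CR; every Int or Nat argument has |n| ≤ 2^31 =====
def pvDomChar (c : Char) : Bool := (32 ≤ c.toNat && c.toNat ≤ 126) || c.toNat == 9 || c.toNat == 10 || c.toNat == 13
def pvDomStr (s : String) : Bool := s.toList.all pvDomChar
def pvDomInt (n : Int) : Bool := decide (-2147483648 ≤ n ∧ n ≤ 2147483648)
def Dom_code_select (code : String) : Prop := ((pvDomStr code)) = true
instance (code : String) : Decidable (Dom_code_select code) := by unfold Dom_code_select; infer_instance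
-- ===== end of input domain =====

-- B replaces A's index-driven while loop by a single regex tokenization (re.findall(r'.#?', …)); objective: idiomatic.

-- ===== PORT A =====
-- A's while loop: i scans by index; a step consumes 1 or 2 characters. Termination on length - i.
def codeSelGo (cs : List Char) (n : Nat) (i : Nat) (acc : List String) : List String :=
  if i < n then
    let c := cs.getD i ' '
    if i < n - 1 ∧ cs.getD (i + 1) ' ' = '#' then
      codeSelGo cs n (i + 2) (acc ++ [String.ofList [c, '#']])
    else
      codeSelGo cs n (i + 1) (acc ++ [String.ofList [c]])
  else acc
termination_by n - i

def code_select (code : String) : List String :=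
  codeSelGo code.toList code.toList.length 0 []

-- ===== PORT B =====
-- transcription of the regex r'.#?' run left to right: any char, optionally followed by '#'
def codeTok : List Char → List String
  | [] => []
  | c :: '#' :: rest => String.ofList [c, '#'] :: codeTok rest
  | c :: rest => String.ofList [c] :: codeTok rest

def code_select_alt (code : String) : List String := codeTok code.toList

-- ===== PRECONDITION & SPEC =====
def Spec_code_select (code : String) (out : List String) : Prop := out = code_select_alt code
instance (code : String) (out : List String) : Decidable (Spec_code_select code out) := by unfold Spec_code_select; infer_instance

-- ===== CLAIM (what is proved, stated in full; the proofs are below) =====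
def Claim_equal_code_select : Prop := ∀ (code : String), Dom_code_select code → Spec_code_select code (code_select code)

-- ===== LEMMAS AND PROOFS =====
theorem codeTok_cons_ne (c d : Char) (rest : List Char) (hne : d ≠ '#') :
    codeTok (c :: d :: rest) = String.ofList [c] :: codeTok (d :: rest) := by
  unfold codeTok
  split
  · simp_all
  · next h' =>
      exfalso
      apply hne
      have := (List.cons.injEq _ _ _ _).mp h'
      exact ((List.cons.injEq _ _ _ _).mp this.2).1
  · next h' =>
      have h1 := (List.cons.injEq _ _ _ _).mp h'
      rw [← h1.1, ← h1.2, ← codeTok.eq_def]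

theorem codeSelGo_eq (cs : List Char) (i : Nat) (acc : List String) :
    codeSelGo cs cs.length i acc = acc ++ codeTok (cs.drop i) := by
  by_cases h : i < cs.length
  · have hd : cs.drop i = cs[i] :: cs.drop (i + 1) := List.drop_eq_getElem_cons h
    have hg : cs.getD i ' ' = cs[i] := List.getD_eq_getElem cs ' ' h
    by_cases h2 : i < cs.length - 1
    · have h1 : i + 1 < cs.length := by omega
      have hd2 : cs.drop (i + 1) = cs[i + 1] :: cs.drop (i + 2) := List.drop_eq_getElem_cons h1
      have hg2 : cs.getD (i + 1) ' ' = cs[i + 1] := List.getD_eq_getElem cs ' ' h1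
      by_cases hh : cs[i + 1] = '#'
      · rw [codeSelGo]
        simp only [h, if_pos, hg, hg2, hh, h2, and_true, if_pos]
        rw [codeSelGo_eq cs (i + 2) _]
        rw [hd, hd2, hh]
        simp [codeTok]
      · rw [codeSelGo]
        have : ¬ (i < cs.length - 1 ∧ cs.getD (i + 1) ' ' = '#') := by
          rw [hg2]; tauto
        simp only [h, if_pos, hg, this, if_neg, not_false_iff]
        rw [codeSelGo_eq cs (i + 1) _]
        rw [hd, hd2]
        rw [codeTok_cons_ne _ _ _ hh]
        simp
    · -- i = length - 1 : last character, rest empty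
      have hlast : i + 1 = cs.length := by omega
      have hd2 : cs.drop (i + 1) = [] := by
        rw [hlast, List.drop_length]
      rw [codeSelGo]
      have hcond : ¬ (i < cs.length - 1 ∧ cs.getD (i + 1) ' ' = '#') := by tauto
      simp only [h, if_pos, hg, hcond, if_neg, not_false_iff]
      rw [codeSelGo_eq cs (i + 1) _]
      rw [hd, hd2]
      simp [codeTok]
  · have : cs.drop i = [] := List.drop_eq_nil_of_le (by omega)
    rw [codeSelGo]
    simp [h, this, codeTok]
termination_by cs.length - i

-- ===== VERDICT (by name: the statement is the Claim_ definition above) =====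
theorem code_select_spec : Claim_equal_code_select := by
  intro code _
  unfold Spec_code_select code_select code_select_alt
  simpa using codeSelGo_eq code.toList 0 []
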